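-- pv_equiv track=rewrite | github.com/asweigart/programmedpatterns | book/visualpatterns.py | pattern60
-- ===== SOURCE A (Python) =====
-- def pattern60(step):
--     size = 1
--     for i in range(2, step + 1):
--         if i % 4 == 2:
--             size += 3
--     row = ('O' * size) + '\n'
--     pattern = row * size
--     return pattern
-- ===== SOURCE B (Python) =====
-- def pattern60(step):
--     size = 1 + 3 * max(0, (step - 2) // 4 + 1)
--     return ''.join('O' * size + '\n' for _ in range(size))
-- ===== Notes on version B (the rewrite author's own statement) =====
-- stated objective: simpler
-- what changed: Replaces the O(step) counting loop with the closed form size = 1 + 3*max(0, (step-2)//4 + 1) and builds the square by joining size generated rows instead of string-repeating one row.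
import Mathlib
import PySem

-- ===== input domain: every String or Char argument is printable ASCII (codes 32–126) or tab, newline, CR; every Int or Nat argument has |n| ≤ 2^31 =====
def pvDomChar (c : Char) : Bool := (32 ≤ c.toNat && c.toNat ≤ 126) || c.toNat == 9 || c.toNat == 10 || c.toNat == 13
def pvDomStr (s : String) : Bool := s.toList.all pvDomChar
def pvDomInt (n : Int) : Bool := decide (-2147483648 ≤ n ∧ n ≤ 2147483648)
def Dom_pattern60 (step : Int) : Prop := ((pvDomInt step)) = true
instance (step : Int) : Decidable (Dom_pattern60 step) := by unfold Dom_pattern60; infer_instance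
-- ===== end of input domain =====

-- B computes size by the closed form 1 + 3*max(0, (step-2)//4 + 1) and assembles the
-- square by joining size generated rows instead of repeating a row string; objective: simpler.

-- ===== PORT A =====
def pattern60 (step : Int) : String :=
  let size : Int :=
    (PySem.List.pyRange 2 (step + 1) 1).foldl
      (fun size i => if PySem.Int.mod i 4 = 2 then size + 3 else size) 1
  let row : String := String.ofList (PySem.List.pyRepeat ['O'] size ++ ['\n'])
  String.ofList (PySem.List.pyRepeat row.toList size)

-- ===== PORT B =====
-- ''.join('O'*size + '\n' for _ in range(size)); size ≥ 1 always, so 'O'*size = replicate size.toNat 'O'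
def pattern60_alt (step : Int) : String :=
  let size : Int := 1 + 3 * max 0 (PySem.Int.floordiv (step - 2) 4 + 1)
  String.ofList ((List.range size.toNat).flatMap
    (fun _ => List.replicate size.toNat 'O' ++ ['\n']))

-- ===== PRECONDITION & SPEC =====
def Spec_pattern60 (step : Int) (out : String) : Prop := out = pattern60_alt step
instance (step : Int) (out : String) : Decidable (Spec_pattern60 step out) := by unfold Spec_pattern60; infer_instance

-- ===== CLAIM =====
def Claim_equal_pattern60 : Prop := ∀ (step : Int), Dom_pattern60 step → Spec_pattern60 step (pattern60 step)

-- ===== LEMMAS AND PROOFS =====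

-- the loop over range(2, step+1), with a generalized start index 2+·
lemma pattern60_fold_eq (n : Nat) (s : Int) :
    (List.range n).foldl
      (fun (acc : Int) (k : Nat) => if PySem.Int.mod (2 + (k : Int)) 4 = 2 then acc + 3 else acc) s
    = s + 3 * (((n + 3) / 4 : Nat) : Int) := by
  induction n generalizing s with
  | zero => simp
  | succ n ih =>
      rw [List.range_succ, List.foldl_append, ih]
      simp only [List.foldl]
      have hmod : PySem.Int.mod (2 + (n : Int)) 4 = (2 + (n : Int)) % 4 :=
        PySem.Int.mod_eq_emod_of_pos (by norm_num)
      rw [hmod]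
      by_cases h : (2 + (n : Int)) % 4 = 2
      · rw [if_pos h]
        have h4 : (n + 1 + 3) / 4 = (n + 3) / 4 + 1 := by omega
        rw [h4]; push_cast; ring
      · rw [if_neg h]
        have h4 : (n + 1 + 3) / 4 = (n + 3) / 4 := by omega
        rw [h4]

-- A's loop computes B's closed form
lemma pattern60_size_eq (step : Int) :
    (PySem.List.pyRange 2 (step + 1) 1).foldl
      (fun size i => if PySem.Int.mod i 4 = 2 then size + 3 else size) 1
    = 1 + 3 * max 0 (PySem.Int.floordiv (step - 2) 4 + 1) := by
  rw [PySem.List.pyRange_one, List.foldl_map]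
  rw [pattern60_fold_eq ((step + 1 - 2).toNat) 1]
  by_cases h : step ≤ 1
  · have h0 : (step + 1 - 2).toNat = 0 := by omega
    have hd : PySem.Int.floordiv (step - 2) 4 + 1 ≤ 0 := by
      have hlt : PySem.Int.floordiv (step - 2) 4 < 0 ↔ step - 2 < 0 * 4 :=
        PySem.Int.floordiv_lt_iff_lt_mul (by norm_num)
      omega
    rw [h0, max_eq_left hd]
    norm_num
  · have h2 : 2 ≤ step := by omega
    have hd : PySem.Int.floordiv (step - 2) 4 = (step - 2) / 4 :=
      PySem.Int.floordiv_eq_ediv_of_pos (by norm_num)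
    rw [hd]
    have hnn : (0 : Int) ≤ (step - 2) / 4 := Int.ediv_nonneg (by omega) (by norm_num)
    rw [max_eq_right (by omega)]
    omega

-- repeating a row string = joining generated rows
lemma pattern60_rows_eq (size : Int) :
    PySem.List.pyRepeat (PySem.List.pyRepeat ['O'] size ++ ['\n']) size
    = (List.range size.toNat).flatMap (fun _ => List.replicate size.toNat 'O' ++ ['\n']) := by
  rw [PySem.List.pyRepeat_singleton]
  simp [PySem.List.pyRepeat, List.flatMap, List.map_const']

theorem pattern60_equal (step : Int) : pattern60 step = pattern60_alt step := by
  unfold pattern60 pattern60_alt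
  rw [pattern60_size_eq]
  simp only [String.toList_ofList]
  rw [pattern60_rows_eq]

-- ===== VERDICT =====
theorem pattern60_spec : Claim_equal_pattern60 := by
  intro step _
  unfold Spec_pattern60
  exact pattern60_equal step
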